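-- pv_equiv track=rewrite | github.com/igemlund/parseqmod | STAAC_Model/bin/STAAC_predict.py | gen_sequential_data
-- ===== SOURCE A (Python) =====
-- aminoAcids = ["A","R","N","D","C","E","Q","G","H","I","L","K","M","F","P","S","T","W","Y","V"]
--
-- def gen_sequential_data(peptide):
--     output = []
--     for i in range(50):
--         lst = [0 for _ in range(20)]
--         if len(peptide) > i:
--             lst[aminoAcids.index(peptide[i])] = 1
--         output = output + lst
--     return output
-- ===== SOURCE B (Python) =====
-- aminoAcids = ["A","R","N","D","C","E","Q","G","H","I","L","K","M","F","P","S","T","W","Y","V"]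
--
-- def gen_sequential_data(peptide):
--     result = [0] * 1000
--     for i, c in enumerate(peptide[:50]):
--         result[i * 20 + aminoAcids.index(c)] = 1
--     return result
-- ===== Notes on version B (the rewrite author's own statement) =====
-- stated objective: simpler
-- what changed: Instead of building a fresh 20-zero sublist per position and growing the output by repeated list concatenation, B preallocates one flat 1000-zero buffer and sets result[i*20 + aminoAcids.index(c)] = 1 for each of the first 50 residues.
import Mathlib
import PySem

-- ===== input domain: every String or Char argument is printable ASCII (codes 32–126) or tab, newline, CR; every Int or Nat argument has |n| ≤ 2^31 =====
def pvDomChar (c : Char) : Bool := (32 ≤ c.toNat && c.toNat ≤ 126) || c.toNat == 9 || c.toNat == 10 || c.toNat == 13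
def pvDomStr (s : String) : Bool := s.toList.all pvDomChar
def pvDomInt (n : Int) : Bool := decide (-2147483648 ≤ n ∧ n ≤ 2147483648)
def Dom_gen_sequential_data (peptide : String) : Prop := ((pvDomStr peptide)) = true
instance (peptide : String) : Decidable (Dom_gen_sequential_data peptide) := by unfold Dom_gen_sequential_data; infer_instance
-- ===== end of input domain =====

-- B replaces A's per-position sublist creation and repeated list concatenation with a single
-- preallocated flat 1000-zero buffer written in place (objective: simpler).

def aminoAcids : List Char :=
  ['A','R','N','D','C','E','Q','G','H','I','L','K','M','F','P','S','T','W','Y','V']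

-- ===== PORT A =====
-- for i in range(50): lst = [0]*20; if len(peptide) > i: lst[aminoAcids.index(peptide[i])] = 1; output = output + lst
-- aminoAcids.index raises ValueError on an unknown residue: that case (index? = none) is excluded by Pre_.
def gen_sequential_data (peptide : String) : List Int :=
  (PySem.List.pyRange 0 50 1).foldl
    (fun output i =>
      let lst : List Int := List.replicate 20 0
      let lst :=
        if (peptide.toList.length : Int) > i then
          match PySem.List.index? aminoAcids (PySem.List.pyGetD peptide.toList i ' ') with
          | some k => lst.set k 1
          | none => lst  -- Python raises ValueError here; outside Pre_
        else lst
      output ++ lst) []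

-- ===== PORT B =====
-- result = [0]*1000; for i, c in enumerate(peptide[:50]): result[i*20 + aminoAcids.index(c)] = 1
def gen_sequential_data_alt (peptide : String) : List Int :=
  (PySem.List.enumerate (PySem.List.slice peptide.toList none (some 50)) 0).foldl
    (fun result ic =>
      match PySem.List.index? aminoAcids ic.2 with
      | some k => PySem.List.pySetD result (ic.1 * 20 + (k : Int)) 1
      | none => result)  -- Python raises ValueError here; outside Pre_
    (List.replicate 1000 0)

-- ===== PRECONDITION & SPEC =====
-- Pre_ excludes exactly the inputs on which A raises ValueError: a residue among the first 50
-- characters that is not in aminoAcids.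
def Pre_gen_sequential_data (peptide : String) : Prop :=
  ((peptide.toList.take 50).all (fun c => aminoAcids.contains c)) = true
instance (peptide : String) : Decidable (Pre_gen_sequential_data peptide) := by
  unfold Pre_gen_sequential_data; infer_instance

def pvWitness_gen_sequential_data : String := "ARNV"

def Spec_gen_sequential_data (peptide : String) (out : List Int) : Prop := out = gen_sequential_data_alt peptide
instance (peptide : String) (out : List Int) : Decidable (Spec_gen_sequential_data peptide out) := by unfold Spec_gen_sequential_data; infer_instance

-- ===== CLAIM (what is proved, stated in full; the proofs are below) =====
def Claim_equal_gen_sequential_data : Prop := ∀ (peptide : String), Dom_gen_sequential_data peptide → Pre_gen_sequential_data peptide → Spec_gen_sequential_data peptide (gen_sequential_data peptide)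

-- ===== LEMMAS AND PROOFS =====

-- the one-hot row for a residue (proof-side normal form shared by both ports)
def oneHot (c : Char) : List Int :=
  match PySem.List.index? aminoAcids c with
  | some k => (List.replicate 20 (0:Int)).set k 1
  | none => List.replicate 20 0

-- B's loop invariant: processing t with enumerate start s into pre ++ zeros writes the
-- one-hot rows right after pre.
lemma B_inv (t : List Char) (s : Nat) (pre : List Int) (r : Nat)
    (hpre : pre.length = 20 * s) (hr : 20 * t.length ≤ r)
    (hmem : ∀ c ∈ t, c ∈ aminoAcids) :
    (PySem.List.enumerate t (s : Int)).foldl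
      (fun result ic =>
        match PySem.List.index? aminoAcids ic.2 with
        | some k => PySem.List.pySetD result (ic.1 * 20 + (k : Int)) 1
        | none => result)
      (pre ++ List.replicate r 0)
    = pre ++ (t.map oneHot).flatten ++ List.replicate (r - 20 * t.length) (0:Int) := by
  induction t generalizing s pre r with
  | nil => simp [PySem.List.enumerate]
  | cons c t ih =>
    have hc : c ∈ aminoAcids := hmem c (by simp)
    obtain ⟨k, hk⟩ := Option.isSome_iff_exists.mp ((PySem.List.index?_isSome_iff aminoAcids c).mpr hc)
    have hk20 : k < 20 := by
      obtain ⟨h, _, _⟩ := PySem.List.getElem_of_index?_eq_some hk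
      simpa [aminoAcids] using h
    rw [PySem.List.enumerate_cons, List.foldl_cons]
    simp only [hk]
    rw [PySem.List.pySetD_of_nonneg _ 1 (by omega : (0:Int) ≤ (s:Int) * 20 + (k:Nat))]
    rw [show ((s:Int) * 20 + (k:Nat)).toNat = 20 * s + k by omega]
    rw [show List.replicate r (0:Int) = List.replicate 20 0 ++ List.replicate (r - 20) 0 by
      rw [← List.replicate_add]; congr 1; simp at hr; omega]
    rw [List.set_append, if_neg (by omega)]
    rw [show 20 * s + k - pre.length = k by omega]
    rw [List.set_append, if_pos (by simpa using hk20)]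
    rw [← List.append_assoc]
    rw [show ((s:Int) + 1) = (((s + 1 : Nat)) : Int) by push_cast; ring]
    rw [ih (s + 1) (pre ++ (List.replicate 20 0).set k 1) (r - 20)
      (by simp [hpre]; omega)
      (by simp at hr; omega)
      (fun d hd => hmem d (List.mem_cons_of_mem _ hd))]
    have hone : oneHot c = (List.replicate 20 0).set k 1 := by unfold oneHot; rw [hk]
    rw [List.map_cons, List.flatten_cons, hone, List.length_cons,
      show r - 20 * (t.length + 1) = r - 20 - 20 * t.length by omega]
    simp [List.append_assoc]

-- A's row for index n, as a function of n : Nat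
def rowA (cs : List Char) (n : Nat) : List Int :=
  if n < cs.length then oneHot (cs.getD n ' ') else List.replicate 20 0

lemma rowA_eq (cs : List Char) (i : Int) (hi : 0 ≤ i) :
    (if (cs.length : Int) > i then
       match PySem.List.index? aminoAcids (PySem.List.pyGetD cs i ' ') with
       | some k => (List.replicate 20 (0:Int)).set k 1
       | none => List.replicate 20 0
     else List.replicate 20 0) = rowA cs i.toNat := by
  unfold rowA
  by_cases h : i.toNat < cs.length
  · rw [if_pos (show (cs.length : Int) > i by omega), if_pos h]
    rw [PySem.List.pyGetD_eq_getElem cs ' ' (by omega) (by omega)]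
    rw [List.getD_eq_getElem cs ' ' h]
    rfl
  · rw [if_neg (show ¬((cs.length : Int) > i) by omega), if_neg h]

-- A's accumulated output after n rows
lemma A_inv (cs : List Char) (n : Nat)
    (hmem : ∀ c ∈ cs.take n, c ∈ aminoAcids) :
    (List.range n).flatMap (rowA cs)
    = ((cs.take n).map oneHot).flatten ++ List.replicate (20 * (n - min n cs.length)) (0:Int) := by
  induction n with
  | zero => simp
  | succ n ih =>
    rw [List.range_succ, List.flatMap_append,
      ih (fun c hc => hmem c (by rw [List.take_add_one]; exact List.mem_append_left _ hc))]
    unfold rowA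
    rw [List.flatMap_singleton]
    by_cases h : n < cs.length
    · rw [if_pos h, List.getD_eq_getElem cs ' ' h, List.take_add_one, List.getElem?_eq_getElem h,
        show 20 * (n - min n cs.length) = 0 by omega,
        show 20 * (n + 1 - min (n + 1) cs.length) = 0 by omega]
      simp
      rw [List.take_add_one, List.getElem?_map, List.getElem?_eq_getElem h]
      simp
    · rw [if_neg h, List.take_add_one]
      have h0 : cs[n]? = none := List.getElem?_eq_none (by omega)
      simp only [h0, Option.toList_none, List.append_nil, List.append_assoc]
      congr 1
      rw [← List.replicate_add]
      congr 1
      omega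

lemma take_length_min (cs : List Char) : (cs.take 50).length = min 50 cs.length := List.length_take

-- ===== VERDICT (by name: the statement is the Claim_ definition above) =====
theorem gen_sequential_data_spec : Claim_equal_gen_sequential_data := by
  intro peptide _ hpre
  unfold Spec_gen_sequential_data gen_sequential_data gen_sequential_data_alt
  set cs := peptide.toList with hcs
  have hmem : ∀ c ∈ cs.take 50, c ∈ aminoAcids := by
    intro c hc
    have := List.all_eq_true.mp hpre c hc
    simpa using this
  -- B side: turn the slice into take
  rw [PySem.List.slice_to cs (by norm_num : (0:Int) ≤ 50)]
  rw [show ((50:Int).toNat) = 50 by rfl]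
  -- A side
  rw [PySem.List.foldl_append_eq_flatMap, List.nil_append]
  rw [show (50 : Int) = ((50 : Nat) : Int) by norm_num, PySem.List.pyRange_zero_nat]
  rw [List.flatMap_map]
  have hfun : ∀ g : Nat → List Int, g = rowA cs →
      (List.range 50).flatMap g = (List.range 50).flatMap (rowA cs) := by
    intro g hg; rw [hg]
  rw [hfun _ (funext fun x => by
    rw [rowA_eq cs (x : Int) (by positivity), Int.toNat_natCast])]
  rw [A_inv cs 50 hmem]
  have := B_inv (cs.take 50) 0 [] 1000 (by simp)
    (by have := take_length_min cs; omega) hmem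
  rw [show ((0:Nat):Int) = (0:Int) by norm_num] at this
  rw [List.nil_append] at this
  rw [this]
  congr 1
  rw [take_length_min]
  congr 1
  have : min 50 cs.length ≤ 50 := Nat.min_le_left _ _
  omega
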